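-- pv_equiv track=rewrite | github.com/elik745i/ESP32-2432S024C-Remote | scripts/generate_multilang_font.py | build_range_arg
-- ===== SOURCE A (Python) =====
-- def build_range_arg(codepoints: list[int]) -> str:
--     ranges: list[str] = []
--     start = end = codepoints[0]
--
--     for cp in codepoints[1:]:
--         if cp == end + 1:
--             end = cp
--             continue
--         ranges.append(f"0x{start:X}" if start == end else f"0x{start:X}-0x{end:X}")
--         start = end = cp
--
--     ranges.append(f"0x{start:X}" if start == end else f"0x{start:X}-0x{end:X}")
--     return ",".join(ranges)
-- ===== SOURCE B (Python) =====
-- def build_range_arg(codepoints: list[int]) -> str: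
--     # Divide and conquer: compute the run list of each half, merge at the boundary.
--     def merge(left, right):
--         (ls, le), (rs, re) = left[-1], right[0]
--         if rs == le + 1:
--             return left[:-1] + [(ls, re)] + right[1:]
--         return left + right
--
--     def runs(lo, hi):
--         if hi - lo <= 1:
--             return [(codepoints[lo], codepoints[lo])] if lo < hi else []
--         mid = (lo + hi) // 2
--         return merge(runs(lo, mid), runs(mid, hi))
--
--     return ",".join(
--         f"0x{s:X}" if s == e else f"0x{s:X}-0x{e:X}"
--         for s, e in runs(0, len(codepoints))
--     )
-- ===== Notes on version B (the rewrite author's own statement) =====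
-- stated objective: alternative
-- what changed: B computes the run list by divide and conquer - recursively splitting the index range in half, computing each half's runs and merging the two boundary runs when consecutive - instead of A's single left-to-right start/end state machine.
-- outside the precondition, e.g. on build_range_arg([]): A raises IndexError, B returns ''
import Mathlib
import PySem

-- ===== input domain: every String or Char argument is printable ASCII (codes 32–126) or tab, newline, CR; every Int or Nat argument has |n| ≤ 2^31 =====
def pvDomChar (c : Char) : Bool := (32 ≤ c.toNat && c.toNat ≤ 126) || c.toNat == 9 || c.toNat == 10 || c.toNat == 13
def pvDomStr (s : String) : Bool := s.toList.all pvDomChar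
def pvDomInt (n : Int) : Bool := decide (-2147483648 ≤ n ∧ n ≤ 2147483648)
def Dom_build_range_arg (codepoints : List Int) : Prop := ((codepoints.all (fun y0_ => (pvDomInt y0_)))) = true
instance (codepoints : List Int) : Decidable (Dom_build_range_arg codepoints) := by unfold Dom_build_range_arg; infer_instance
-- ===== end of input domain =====

-- B replaces A's left-to-right start/end state machine by divide and conquer on the index
-- range (merge the halves' run lists at the boundary); Pre_ excludes the empty list, on
-- which A raises IndexError (B returns "" there, see the Raises_ block).

-- f"{n:X}": uppercase hex digits, '-' prefix for negative n (exact for Python's int formatting)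
def pyHexX (n : Int) : String :=
  if n < 0 then "-" ++ (Nat.toDigits 16 n.natAbs).asString.toUpper
  else (Nat.toDigits 16 n.natAbs).asString.toUpper

-- ===== PORT A =====
-- the for-loop over codepoints[1:], state (ranges, start, end)
def brLoopA : List Int → List String → Int → Int → (List String × Int × Int)
  | [], ranges, start, end_ => (ranges, start, end_)
  | cp :: rest, ranges, start, end_ =>
    if cp = end_ + 1 then brLoopA rest ranges start cp
    else brLoopA rest
      (ranges ++ [if start = end_ then "0x" ++ pyHexX start
                  else "0x" ++ pyHexX start ++ "-0x" ++ pyHexX end_]) cp cp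

def build_range_arg (codepoints : List Int) : String :=
  match codepoints with
  | [] => ""   -- Python raises IndexError on codepoints[0]; excluded by Pre_
  | c :: rest =>
    let r := brLoopA rest [] c c
    String.intercalate ","
      (r.1 ++ [if r.2.1 = r.2.2 then "0x" ++ pyHexX r.2.1
               else "0x" ++ pyHexX r.2.1 ++ "-0x" ++ pyHexX r.2.2])

-- ===== PORT B =====
-- Source B's merge(left, right): join the boundary runs if consecutive (both args nonempty in every call)
def brMerge (left right : List (Int × Int)) : List (Int × Int) :=
  let lastL := left.getLast?.getD (0, 0)      -- left[-1]; left is nonempty in every call Source B makes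
  let firstR := right.headD (0, 0)            -- right[0]; right is nonempty in every call Source B makes
  if firstR.1 = lastL.2 + 1 then left.dropLast ++ [(lastL.1, firstR.2)] ++ right.tail
  else left ++ right

-- Source B's runs(lo, hi): run list of codepoints[lo:hi] by halving
-- (fuel = a bound on hi - lo makes the same recursion structural; it never runs out on the calls made)
def brRuns (codepoints : List Int) : Nat → Int → Int → List (Int × Int)
  | 0, _, _ => []
  | fuel + 1, lo, hi =>
    if hi - lo ≤ 1 then
      if lo < hi then
        [(PySem.List.pyGetD codepoints lo 0, PySem.List.pyGetD codepoints lo 0)]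
      else []
    else
      brMerge (brRuns codepoints fuel lo (PySem.Int.floordiv (lo + hi) 2))
              (brRuns codepoints fuel (PySem.Int.floordiv (lo + hi) 2) hi)

def brFmt (p : Int × Int) : String :=
  if p.1 = p.2 then "0x" ++ pyHexX p.1 else "0x" ++ pyHexX p.1 ++ "-0x" ++ pyHexX p.2

def build_range_arg_alt (codepoints : List Int) : String :=
  String.intercalate "," ((brRuns codepoints codepoints.length 0 codepoints.length).map brFmt)

-- ===== PRECONDITION & SPEC =====
-- Pre_ excludes exactly the empty list, on which Python A raises IndexError.
def Pre_build_range_arg (codepoints : List Int) : Prop := codepoints ≠ []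
instance (codepoints : List Int) : Decidable (Pre_build_range_arg codepoints) := by unfold Pre_build_range_arg; infer_instance
def pvWitness_build_range_arg : List Int := [3, 4, 5, 9]

def Spec_build_range_arg (codepoints : List Int) (out : String) : Prop := out = build_range_arg_alt codepoints
instance (codepoints : List Int) (out : String) : Decidable (Spec_build_range_arg codepoints out) := by unfold Spec_build_range_arg; infer_instance

-- ===== CLAIM (what is proved, stated in full; the proofs are below) =====
def Claim_equal_build_range_arg : Prop := ∀ (codepoints : List Int), Dom_build_range_arg codepoints → Pre_build_range_arg codepoints → Spec_build_range_arg codepoints (build_range_arg codepoints)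

-- ===== LEMMAS AND PROOFS =====

-- canonical run list, the shared characterisation of both ports
def runsOf : Int → Int → List Int → List (Int × Int)
  | s, e, [] => [(s, e)]
  | s, e, cp :: rest =>
    if cp = e + 1 then runsOf s cp rest else (s, e) :: runsOf cp cp rest

def runEnd : Int → List Int → Int
  | e, [] => e
  | e, cp :: rest => if cp = e + 1 then runEnd cp rest else e

def runTail : Int → List Int → List (Int × Int)
  | _, [] => []
  | e, cp :: rest => if cp = e + 1 then runTail cp rest else runsOf cp cp rest

theorem runsOf_eq (xs : List Int) : ∀ s e : Int,
    runsOf s e xs = (s, runEnd e xs) :: runTail e xs := by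
  induction xs with
  | nil => intro s e; simp [runsOf, runEnd, runTail]
  | cons cp rest ih =>
    intro s e
    by_cases h : cp = e + 1
    · simp [runsOf, runEnd, runTail, h, ih]
    · simp [runsOf, runEnd, runTail, h]

theorem runsOf_ne_nil (xs : List Int) (s e : Int) : runsOf s e xs ≠ [] := by
  rw [runsOf_eq]; simp

theorem brMerge_cons (p : Int × Int) (L R : List (Int × Int)) (hL : L ≠ []) :
    brMerge (p :: L) R = p :: brMerge L R := by
  obtain ⟨b, l, rfl⟩ := List.exists_cons_of_ne_nil hL
  simp only [brMerge, List.getLast?_cons_cons, List.dropLast_cons_of_ne_nil (by simp : b :: l ≠ [])]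
  split_ifs <;> simp

theorem runsOf_append (xs : List Int) : ∀ (s e y : Int) (yt : List Int),
    runsOf s e (xs ++ y :: yt) = brMerge (runsOf s e xs) (runsOf y y yt) := by
  induction xs with
  | nil =>
    intro s e y yt
    by_cases h : y = e + 1
    · simp [runsOf, h, brMerge, runsOf_eq yt]
    · simp [runsOf, h, brMerge, runsOf_eq yt]
  | cons x xt ih =>
    intro s e y yt
    by_cases h : x = e + 1
    · simp only [List.cons_append, runsOf, if_pos h]
      exact ih s x y yt
    · simp only [List.cons_append, runsOf, if_neg h]
      rw [ih x x y yt, brMerge_cons _ _ _ (runsOf_ne_nil _ _ _)]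

def runsList : List Int → List (Int × Int)
  | [] => []
  | c :: rest => runsOf c c rest

theorem runsList_append (xs ys : List Int) (hx : xs ≠ []) (hy : ys ≠ []) :
    runsList (xs ++ ys) = brMerge (runsList xs) (runsList ys) := by
  obtain ⟨c, rest, rfl⟩ := List.exists_cons_of_ne_nil hx
  obtain ⟨y, yt, rfl⟩ := List.exists_cons_of_ne_nil hy
  simp only [runsList, List.cons_append]
  exact runsOf_append rest c c y yt

-- the segment codepoints[lo:hi] for 0 ≤ lo ≤ hi ≤ len
def seg (l : List Int) (lo hi : Int) : List Int := (l.drop lo.toNat).take (hi - lo).toNat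

theorem brRuns_eq_runsList (l : List Int) : ∀ (f : Nat) (lo hi : Int), (hi - lo).toNat ≤ f →
    0 ≤ lo → hi ≤ l.length → brRuns l f lo hi = runsList (seg l lo hi) := by
  intro f
  induction f with
  | zero =>
    intro lo hi hf hlo hhi
    have : (hi - lo).toNat = 0 := by omega
    unfold seg
    rw [this]
    simp [brRuns, runsList]
  | succ f ih =>
    intro lo hi hf hlo hhi
    by_cases hsm : hi - lo ≤ 1
    · simp only [brRuns, if_pos hsm]
      by_cases hlt : lo < hi
      · have hlen : lo.toNat < l.length := by omega
        have hget : PySem.List.pyGetD l lo 0 = l[lo.toNat] :=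
          PySem.List.pyGetD_eq_getElem l 0 hlo (by omega)
        have hseg : seg l lo hi = [l[lo.toNat]] := by
          unfold seg
          have h1 : (hi - lo).toNat = 1 := by omega
          rw [h1]
          rw [List.take_one]
          have : (l.drop lo.toNat).head? = some l[lo.toNat] := by
            rw [List.head?_drop]
            simp [hlen]
          simp [this]
        rw [if_pos hlt, hseg, hget]
        simp [runsList, runsOf]
      · rw [if_neg hlt]
        have : (hi - lo).toNat = 0 := by omega
        unfold seg
        rw [this]
        simp [runsList]
    · simp only [brRuns, if_neg hsm]
      set mid := PySem.Int.floordiv (lo + hi) 2 with hmid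
      have hb := PySem.Int.floordiv_two_mid_bounds (lo := lo) (hi := hi) (by omega)
      have h3 : mid * 2 ≤ lo + hi ∧ lo + hi < (mid + 1) * 2 :=
        (PySem.Int.floordiv_eq_iff_of_pos (a := lo + hi) (b := 2) (q := mid) (by omega)).mp rfl
      have hlm : lo < mid := by omega
      have hmh : mid < hi := by omega
      rw [ih lo mid (by omega) hlo (by omega),
          ih mid hi (by omega) (by omega) hhi]
      have hsplit : seg l lo hi = seg l lo mid ++ seg l mid hi := by
        unfold seg
        have h1 : (hi - lo).toNat = (mid - lo).toNat + (hi - mid).toNat := by omega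
        have h2 : lo.toNat + (mid - lo).toNat = mid.toNat := by omega
        rw [h1, List.take_add, List.drop_drop, h2]
      rw [hsplit, runsList_append]
      · unfold seg
        intro hc
        have := congrArg List.length hc
        simp at this
        omega
      · unfold seg
        intro hc
        have := congrArg List.length hc
        simp at this
        omega

-- A's loop produces the formatted canonical runs
theorem brLoopA_runsOf (xs : List Int) :
    ∀ (acc : List String) (s e : Int),
      (brLoopA xs acc s e).1 ++ [brFmt (brLoopA xs acc s e).2]
        = acc ++ (runsOf s e xs).map brFmt := by
  induction xs with
  | nil => intro acc s e; simp [brLoopA, runsOf]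
  | cons cp rest ih =>
    intro acc s e
    by_cases h : cp = e + 1
    · simpa [brLoopA, runsOf, h] using ih acc s cp
    · simp only [brLoopA, runsOf, if_neg h]
      rw [ih]
      simp [brFmt]

-- ===== VERDICT (by name: the statements are the Claim_ definitions above) =====
theorem build_range_arg_spec : Claim_equal_build_range_arg := by
  intro codepoints _ hpre
  unfold Spec_build_range_arg
  match codepoints with
  | [] => exact absurd rfl hpre
  | c :: rest =>
    show build_range_arg (c :: rest) = build_range_arg_alt (c :: rest)
    unfold build_range_arg build_range_arg_alt
    have hB := brRuns_eq_runsList (c :: rest) (c :: rest).length 0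
      ((c :: rest).length : Int) (by omega) (by omega) (by omega)
    have hseg : seg (c :: rest) 0 ((c :: rest).length : Int) = c :: rest := by
      unfold seg; simp
    rw [hB, hseg]
    have hA := brLoopA_runsOf rest [] c c
    simp only [List.nil_append] at hA
    simp only [brFmt] at hA
    rw [show runsList (c :: rest) = runsOf c c rest from rfl, ← hA]
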